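-- pv_equiv track=rewrite | github.com/sezer-muhammed/equations_reading | src/core/utils.py | validate_latex
-- ===== SOURCE A (Python) =====
-- def validate_latex(latex_expr: str) -> bool:
--     """Basic validation of LaTeX expressions."""
--     # Check for balanced braces
--     brace_count = 0
--     for char in latex_expr:
--         if char == '{':
--             brace_count += 1
--         elif char == '}':
--             brace_count -= 1
--         if brace_count < 0:
--             return False
--     return brace_count == 0
-- ===== SOURCE B (Python) =====
-- def _reduced(s):
--     """Reduced form of s under repeated cancellation of '{}': s cancels to
--     '}'*a + '{'*b; return (a, b). Computed by divide and conquer: split in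
--     half, reduce both halves, then match the left half's surplus openers
--     against the right half's surplus closers."""
--     if len(s) == 1:
--         if s == '{':
--             return (0, 1)
--         if s == '}':
--             return (1, 0)
--         return (0, 0)
--     mid = len(s) // 2
--     a1, b1 = _reduced(s[:mid])
--     a2, b2 = _reduced(s[mid:])
--     return (a1 + max(a2 - b1, 0), b2 + max(b1 - a2, 0))
--
--
-- def validate_latex(latex_expr: str) -> bool:
--     """Braces are balanced iff the whole string cancels to the empty reduced form."""
--     if not latex_expr:
--         return True
--     return _reduced(latex_expr) == (0, 0)
-- ===== Notes on version B (the rewrite author's own statement) =====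
-- stated objective: alternative
-- what changed: Replaced the sequential early-exit counter scan by a divide-and-conquer that reduces each half of the string to its cancelled normal form '}'*a+'{'*b and merges the two summaries; balanced iff the whole string reduces to (0,0).
import Mathlib
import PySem

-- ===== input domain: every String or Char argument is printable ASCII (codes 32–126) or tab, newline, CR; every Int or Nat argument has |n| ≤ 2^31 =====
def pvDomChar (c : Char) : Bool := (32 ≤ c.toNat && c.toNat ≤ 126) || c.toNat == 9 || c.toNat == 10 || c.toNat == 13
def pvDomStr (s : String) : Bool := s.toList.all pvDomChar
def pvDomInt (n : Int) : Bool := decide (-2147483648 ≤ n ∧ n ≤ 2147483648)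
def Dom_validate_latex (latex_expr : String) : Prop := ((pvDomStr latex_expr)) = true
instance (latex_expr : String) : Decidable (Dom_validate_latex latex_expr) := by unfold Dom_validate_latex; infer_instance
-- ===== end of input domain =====

-- B replaces A's sequential early-exit counter scan by a divide-and-conquer that
-- reduces each half to its cancelled normal form '}'^a '{'^b and merges the halves
-- (an alternative algorithm, same result).

-- ===== PORT A =====
-- the for-loop over the characters with the running brace_count, early return on < 0
def pvGoA (brace_count : Int) : List Char → Bool
  | [] => brace_count == 0
  | ch :: rest =>
    let brace_count :=
      if ch = '{' then brace_count + 1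
      else if ch = '}' then brace_count - 1
      else brace_count
    if brace_count < 0 then false else pvGoA brace_count rest

def validate_latex (latex_expr : String) : Bool := pvGoA 0 latex_expr.toList

-- ===== PORT B =====
-- _reduced: divide and conquer on the character list; s[:mid]/s[mid:] are
-- List.take/List.drop (exact for these nonnegative in-range slice bounds).
-- Python is only ever called with a nonempty string; the [] branch is a
-- totality guard for Lean's recursion and is unreachable from validate_latex_alt.
def pvReduced (chars : List Char) : Int × Int :=
  if chars.length ≤ 1 then
    match chars with
    | [] => (0, 0)
    | ch :: _ => if ch = '{' then (0, 1) else if ch = '}' then (1, 0) else (0, 0)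
  else
    let mid := chars.length / 2
    let s1 := pvReduced (chars.take mid)
    let s2 := pvReduced (chars.drop mid)
    (s1.1 + max (s2.1 - s1.2) 0, s2.2 + max (s1.2 - s2.1) 0)
termination_by chars.length
decreasing_by
  · simp only [List.length_take]; omega
  · simp only [List.length_drop]; omega

def validate_latex_alt (latex_expr : String) : Bool :=
  if latex_expr.toList = [] then true
  else pvReduced latex_expr.toList == (0, 0)

-- ===== PRECONDITION & SPEC =====
def Spec_validate_latex (latex_expr : String) (out : Bool) : Prop := out = validate_latex_alt latex_expr
instance (latex_expr : String) (out : Bool) : Decidable (Spec_validate_latex latex_expr out) := by unfold Spec_validate_latex; infer_instance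

-- ===== CLAIM (what is proved, stated in full; the proofs are below) =====
def Claim_equal_validate_latex : Prop := ∀ (latex_expr : String), Dom_validate_latex latex_expr → Spec_validate_latex latex_expr (validate_latex latex_expr)

-- ===== LEMMAS AND PROOFS =====

-- The invariant tying B's summary (a, b) of a block to A's scan: running A's loop
-- through the block from a counter c >= 0 fails iff c < a, and otherwise continues
-- into the rest with counter c - a + b.
theorem pvReduced_invariant : ∀ (chars : List Char),
    0 ≤ (pvReduced chars).1 ∧ 0 ≤ (pvReduced chars).2 ∧
    ∀ (c : Int) (l2 : List Char), 0 ≤ c →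
      pvGoA c (chars ++ l2) =
        if c < (pvReduced chars).1 then false
        else pvGoA (c - (pvReduced chars).1 + (pvReduced chars).2) l2 := by
  intro chars
  induction chars using pvReduced.induct with
  | case1 _ =>
    refine ⟨by simp [pvReduced], by simp [pvReduced], ?_⟩
    intro c l2 hc
    have hn : ¬ c < (0:Int) := by omega
    simp [pvReduced, hn]
  | case2 tail hle =>
    have ht : tail = [] := by cases tail <;> simp_all
    subst ht
    refine ⟨by simp [pvReduced], by simp [pvReduced], ?_⟩
    intro c l2 hc
    have hn : ¬ c + 1 < (0:Int) := by omega
    have hn' : ¬ c < (0:Int) := by omega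
    simp [pvReduced, pvGoA, hn, hn']
  | case3 tail hne hle =>
    have ht : tail = [] := by cases tail <;> simp_all
    subst ht
    refine ⟨by simp [pvReduced], by simp [pvReduced], ?_⟩
    intro c l2 hc
    by_cases h1 : c - 1 < (0:Int)
    · have h2 : c < (1:Int) := by omega
      simp [pvReduced, pvGoA, h1, h2]
    · have h2 : ¬ c < (1:Int) := by omega
      simp [pvReduced, pvGoA, h1, h2]
  | case4 ch tail h1 h2 hle =>
    have ht : tail = [] := by cases tail <;> simp_all
    subst ht
    refine ⟨by simp [pvReduced, h1, h2], by simp [pvReduced, h1, h2], ?_⟩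
    intro c l2 hc
    have hn : ¬ c < (0:Int) := by omega
    simp [pvReduced, pvGoA, h1, h2, hn]
  | case5 x hgt mid ih1 ih2 =>
    have hmid : mid = x.length / 2 := rfl
    rw [hmid] at ih1 ih2
    obtain ⟨ha1, hb1, hrun1⟩ := ih1
    obtain ⟨ha2, hb2, hrun2⟩ := ih2
    have hred : pvReduced x =
        ((pvReduced (List.take (x.length / 2) x)).1 +
           max ((pvReduced (List.drop (x.length / 2) x)).1 - (pvReduced (List.take (x.length / 2) x)).2) 0,
         (pvReduced (List.drop (x.length / 2) x)).2 +
           max ((pvReduced (List.take (x.length / 2) x)).2 - (pvReduced (List.drop (x.length / 2) x)).1) 0) := by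
      conv_lhs => rw [pvReduced.eq_def]
      simp [hgt]
    generalize hp1 : pvReduced (List.take (x.length / 2) x) = p1 at hred ha1 hb1 hrun1
    generalize hp2 : pvReduced (List.drop (x.length / 2) x) = p2 at hred ha2 hb2 hrun2
    obtain ⟨a1, b1⟩ := p1
    obtain ⟨a2, b2⟩ := p2
    simp only at ha1 hb1 ha2 hb2 hrun1 hrun2
    refine ⟨by rw [hred]; dsimp; omega, by rw [hred]; dsimp; omega, ?_⟩
    intro c l2 hc
    rw [hred]
    have hsplit : x ++ l2 = List.take (x.length / 2) x ++ (List.drop (x.length / 2) x ++ l2) := by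
      rw [← List.append_assoc, List.take_append_drop]
    rw [hsplit, hrun1 c _ hc]
    dsimp
    by_cases h1 : c < a1
    · have hA : c < a1 + max (a2 - b1) 0 := by omega
      simp [h1, hA]
    · rw [hrun2 _ l2 (by omega)]
      by_cases h2 : c - a1 + b1 < a2
      · have hA : c < a1 + max (a2 - b1) 0 := by omega
        simp [h1, h2, hA]
      · have hA : ¬ c < a1 + max (a2 - b1) 0 := by omega
        simp only [h1, h2, hA, if_false]
        have he : c - a1 + b1 - a2 + b2 =
            c - (a1 + max (a2 - b1) 0) + (b2 + max (b1 - a2) 0) := by omega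
        rw [he]

theorem pvGoA_eq_reduced (l : List Char) :
    pvGoA 0 l = (pvReduced l == (0, 0)) := by
  obtain ⟨h1, h2, h3⟩ := pvReduced_invariant l
  have hrun := h3 0 [] (le_refl 0)
  rw [List.append_nil] at hrun
  rw [hrun]
  rcases hp : pvReduced l with ⟨a, b⟩
  rw [hp] at h1 h2
  simp only at h1 h2 ⊢
  by_cases ha : (0:Int) < a
  · simp [ha, Prod.ext_iff]
    omega
  · have ha0 : a = 0 := by omega
    subst ha0
    simp [pvGoA, Prod.ext_iff]

-- ===== VERDICT (by name: the statement is the Claim_ definition above) =====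
theorem validate_latex_spec : Claim_equal_validate_latex := by
  intro s _
  unfold Spec_validate_latex validate_latex validate_latex_alt
  by_cases h : s.toList = []
  · simp [h, pvGoA]
  · simp [h, pvGoA_eq_reduced s.toList]
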